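-- pv_equiv track=rewrite | github.com/SvetlanaNesmiyan/lab_py_courses | lessons6.3.py | multiply_digits
-- ===== SOURCE A (Python) =====
-- def multiply_digits(number):
--
--   while number > 9:
--     product = 1
--     while number > 0:
--       digit = number % 10
--       product *= digit
--       number //= 10
--     number = product
--   return number
-- ===== SOURCE B (Python) =====
-- def multiply_digits(number):
--     if number <= 9:
--         return number
--     p = 1
--     for d in str(number):
--         p *= int(d)
--     return multiply_digits(p)
-- ===== Notes on version B (the rewrite author's own statement) =====
-- stated objective: alternative
-- what changed: Replaces A's two nested while loops with arithmetic LSB-first digit extraction by a recursion on the multiplicative-root recurrence whose digit product is read MSB-first off str(number).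
import Mathlib
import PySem

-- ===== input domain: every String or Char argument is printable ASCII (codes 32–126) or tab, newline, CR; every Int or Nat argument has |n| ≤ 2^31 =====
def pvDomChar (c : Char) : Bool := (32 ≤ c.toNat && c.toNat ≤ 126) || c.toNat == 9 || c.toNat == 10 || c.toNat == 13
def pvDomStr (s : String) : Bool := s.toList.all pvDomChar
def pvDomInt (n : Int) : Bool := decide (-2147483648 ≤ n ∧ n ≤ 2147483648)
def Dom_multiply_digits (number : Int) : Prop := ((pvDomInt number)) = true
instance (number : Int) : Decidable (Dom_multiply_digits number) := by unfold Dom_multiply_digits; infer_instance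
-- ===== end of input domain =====

-- Multiplicative digital root: B replaces A's two nested while loops (LSB-first arithmetic digit
-- extraction) by recursion on the root recurrence with the digit product read MSB-first off str(number).


-- ——— measure helpers (cited by the ports' decreasing_by; proofs of the claim reuse them below) ———

-- digit product of a natural number (empty product 1), the common termination measure
def pvDigProd (n : Nat) : Nat :=
  if h : n = 0 then 1 else (n % 10) * pvDigProd (n / 10)
decreasing_by exact Nat.div_lt_self (Nat.pos_of_ne_zero h) (by omega)

lemma pvDigProd_le (n : Nat) (h : 0 < n) : pvDigProd n ≤ n := by
  induction n using Nat.strong_induction_on with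
  | _ n ih =>
    rw [pvDigProd]
    split
    · omega
    · rename_i hn
      by_cases hq : n / 10 = 0
      · rw [hq, pvDigProd]; simp; omega
      · have := ih (n / 10) (Nat.div_lt_self (by omega) (by omega)) (by omega)
        have h9 : n % 10 ≤ 9 := by omega
        calc n % 10 * pvDigProd (n / 10) ≤ 9 * (n / 10) :=
              Nat.mul_le_mul h9 this
          _ ≤ n := by omega

lemma pvDigProd_lt (n : Nat) (h : 10 ≤ n) : pvDigProd n < n := by
  rw [pvDigProd]
  split
  · omega
  · have hq : 0 < n / 10 := by omega
    have := pvDigProd_le (n / 10) hq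
    have h9 : n % 10 ≤ 9 := by omega
    calc n % 10 * pvDigProd (n / 10) ≤ 9 * (n / 10) := Nat.mul_le_mul h9 this
      _ < n := by omega

-- ===== PORT A =====
-- inner 'while number > 0: digit = number % 10; product *= digit; number //= 10' loop of A
def pvInnerA (n product : Int) : Int :=
  if 0 < n then pvInnerA (PySem.Int.floordiv n 10) (product * PySem.Int.mod n 10) else product
termination_by n.toNat
decreasing_by
  rename_i h
  have : PySem.Int.floordiv n 10 = (((n.toNat / 10 : Nat)) : Int) := by
    have hn : n = ((n.toNat : Nat) : Int) := by omega
    rw [hn]; exact_mod_cast PySem.Int.floordiv_natCast n.toNat 10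
  rw [this]
  simp only [Int.toNat_natCast]
  exact Nat.div_lt_self (by omega) (by omega)

-- pvInnerA accumulates product · (digit product of n), needed for the outer loop's termination
lemma pvInnerA_eq_aux (k : Nat) : ∀ n p : Int, 0 ≤ n → n.toNat ≤ k →
    pvInnerA n p = p * (pvDigProd n.toNat : Int) := by
  induction k with
  | zero =>
    intro n p h0 hk
    have hn : n = 0 := by omega
    subst hn
    rw [pvInnerA]
    simp [pvDigProd]
  | succ k ih =>
    intro n p h0 hk
    rw [pvInnerA]
    by_cases hpos : 0 < n
    · have hcast : n = ((n.toNat : Nat) : Int) := by omega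
      have hfd : PySem.Int.floordiv n 10 = (((n.toNat / 10 : Nat)) : Int) := by
        rw [hcast]; exact_mod_cast PySem.Int.floordiv_natCast n.toNat 10
      have hmd : PySem.Int.mod n 10 = (((n.toNat % 10 : Nat)) : Int) := by
        rw [hcast]; exact_mod_cast PySem.Int.mod_natCast n.toNat 10
      simp only [hpos, if_true, hfd, hmd]
      have hlt : n.toNat / 10 < n.toNat := Nat.div_lt_self (by omega) (by omega)
      rw [ih _ _ (by positivity) (by simp; omega)]
      simp only [Int.toNat_natCast]
      rw [show pvDigProd n.toNat = n.toNat % 10 * pvDigProd (n.toNat / 10) by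
        rw [pvDigProd]; split
        · omega
        · rfl]
      push_cast
      ring
    · have hn : n = 0 := by omega
      subst hn
      simp [pvDigProd]

lemma pvInnerA_eq (n : Int) (p : Int) (hn : 0 ≤ n) :
    pvInnerA n p = p * (pvDigProd n.toNat : Int) :=
  pvInnerA_eq_aux n.toNat n p hn le_rfl

-- port of A: outer 'while number > 9' loop
def multiply_digits (number : Int) : Int :=
  if 9 < number then multiply_digits (pvInnerA number 1) else number
termination_by number.toNat
decreasing_by
  rename_i h
  rw [pvInnerA_eq number 1 (by omega), one_mul]
  have h10 : 10 ≤ number.toNat := by omega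
  have := pvDigProd_lt number.toNat h10
  omega

-- ===== PORT B =====
-- 'p = 1; for d in str(number): p *= int(d)' — int(d) on a decimal digit char is its value
-- (c.toNat - 48), exact here because str(number) for number > 9 contains only '0'..'9'
def pvStrProdB (number : Int) : Int :=
  (PySem.Int.toChars number).foldl (fun p c => p * ((c.toNat - 48 : Nat) : Int)) 1

-- int(digitChar d) is d for a decimal digit
lemma pv_digitChar_val (d : Nat) (h : d < 10) : ((Nat.digitChar d).toNat - 48 : Nat) = d := by
  interval_cases d <;> decide

-- the MSB-first digit list produced by Nat.toDigitsCore folds to the digit product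
lemma pv_toDigitsCore_fold (f : Nat) : ∀ (n : Nat) (l : List Char) (p : Int), 0 < n → n < 10 ^ f →
    List.foldl (fun p c => p * ((c.toNat - 48 : Nat) : Int)) p (Nat.toDigitsCore 10 f n l)
      = List.foldl (fun p c => p * ((c.toNat - 48 : Nat) : Int)) (p * (pvDigProd n : Int)) l := by
  induction f with
  | zero =>
    intro n l p h0 hf
    omega
  | succ f ih =>
    intro n l p h0 hf
    have hd : ((Nat.digitChar (n % 10)).toNat - 48 : Nat) = n % 10 :=
      pv_digitChar_val (n % 10) (by omega)
    have hprod : pvDigProd n = n % 10 * pvDigProd (n / 10) := by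
      rw [pvDigProd]; split
      · omega
      · rfl
    simp only [Nat.toDigitsCore]
    by_cases hq : n / 10 = 0
    · simp only [hq, if_true, List.foldl_cons, hd]
      have : pvDigProd n = n % 10 := by rw [hprod, hq, pvDigProd]; simp
      rw [this]
    · simp only [hq, if_false]
      have hlt : n / 10 < 10 ^ f := by
        rw [Nat.div_lt_iff_lt_mul (by omega)]
        calc n < 10 ^ (f + 1) := hf
          _ = 10 ^ f * 10 := by ring
      rw [ih (n / 10) _ p (by omega) hlt]
      simp only [List.foldl_cons, hd, hprod]
      push_cast
      congr 1
      ring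

lemma pvStrProdB_eq (number : Int) (h : 9 < number) :
    pvStrProdB number = (pvDigProd number.toNat : Int) := by
  unfold pvStrProdB
  have hneg : ¬ number < 0 := by omega
  rw [show PySem.Int.toChars number = Nat.toDigits 10 number.toNat by
    simp [PySem.Int.toChars, hneg]]
  unfold Nat.toDigits
  rw [pv_toDigitsCore_fold (number.toNat + 1) number.toNat [] 1 (by omega)
    (lt_of_lt_of_le (Nat.lt_pow_self (by omega)) (Nat.pow_le_pow_right (by omega) (by omega)))]
  simp

def multiply_digits_alt (number : Int) : Int :=
  if number ≤ 9 then number else multiply_digits_alt (pvStrProdB number)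
termination_by number.toNat
decreasing_by
  rename_i h
  rw [pvStrProdB_eq number (by omega)]
  have := pvDigProd_lt number.toNat (by omega)
  omega

-- ===== PRECONDITION & SPEC =====
def Spec_multiply_digits (number : Int) (out : Int) : Prop := out = multiply_digits_alt number
instance (number : Int) (out : Int) : Decidable (Spec_multiply_digits number out) := by unfold Spec_multiply_digits; infer_instance

-- ===== CLAIM (what is proved, stated in full; the proofs are below) =====
def Claim_equal_multiply_digits : Prop := ∀ (number : Int), Dom_multiply_digits number → Spec_multiply_digits number (multiply_digits number)

-- ===== LEMMAS AND PROOFS =====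

lemma pv_main (k : Nat) : ∀ number : Int, number.toNat ≤ k →
    multiply_digits number = multiply_digits_alt number := by
  induction k with
  | zero =>
    intro number h
    rw [multiply_digits, multiply_digits_alt]
    have h1 : ¬ 9 < number := by omega
    have h2 : number ≤ 9 := by omega
    simp [h1, h2]
  | succ k ih =>
    intro number h
    rw [multiply_digits, multiply_digits_alt]
    by_cases h9 : 9 < number
    · have h9' : ¬ number ≤ 9 := by omega
      simp only [h9, if_true, h9', if_false]
      rw [pvInnerA_eq number 1 (by omega), one_mul, ← pvStrProdB_eq number h9]
      apply ih
      rw [pvStrProdB_eq number h9]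
      have := pvDigProd_lt number.toNat (by omega)
      omega
    · have h2 : number ≤ 9 := by omega
      simp [h9, h2]

-- ===== VERDICT (by name: the statement is the Claim_ definition above) =====
theorem multiply_digits_spec : Claim_equal_multiply_digits := by
  intro number _
  unfold Spec_multiply_digits
  exact pv_main number.toNat number le_rfl
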